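-- pv_equiv track=rewrite | github.com/VaddepallyMeghana/opensource | visaprep/ram'sabsence.py | max_consecutive_absent_days
-- ===== SOURCE A (Python) =====
-- def max_consecutive_absent_days(n, attendance):
--     max_absent_streak = 0
--     current_streak = 0
--
--     for i in range(n):
--         if attendance[i] == 0:
--             current_streak += 1
--         else:
--             max_absent_streak = max(max_absent_streak, current_streak)
--             current_streak = 0
--     max_absent_streak = max(max_absent_streak, current_streak)
--
--     return max_absent_streak
-- ===== SOURCE B (Python) =====
-- def max_consecutive_absent_days(n, attendance):
--     prefix = [attendance[i] for i in range(n)]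
--     runs = []
--     i = 0
--     while i < len(prefix):
--         if prefix[i] == 0:
--             j = i
--             while j < len(prefix) and prefix[j] == 0:
--                 j += 1
--             runs.append(j - i)
--             i = j
--         else:
--             i += 1
--     return max(runs, default=0)
-- ===== Notes on version B (the rewrite author's own statement) =====
-- stated objective: alternative
-- what changed: B materialises the first n days, splits them into maximal runs of consecutive zeros collected as a list of run lengths, and returns the max of that list with default 0, instead of A's single pass maintaining a current/best streak pair.
import Mathlib
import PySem

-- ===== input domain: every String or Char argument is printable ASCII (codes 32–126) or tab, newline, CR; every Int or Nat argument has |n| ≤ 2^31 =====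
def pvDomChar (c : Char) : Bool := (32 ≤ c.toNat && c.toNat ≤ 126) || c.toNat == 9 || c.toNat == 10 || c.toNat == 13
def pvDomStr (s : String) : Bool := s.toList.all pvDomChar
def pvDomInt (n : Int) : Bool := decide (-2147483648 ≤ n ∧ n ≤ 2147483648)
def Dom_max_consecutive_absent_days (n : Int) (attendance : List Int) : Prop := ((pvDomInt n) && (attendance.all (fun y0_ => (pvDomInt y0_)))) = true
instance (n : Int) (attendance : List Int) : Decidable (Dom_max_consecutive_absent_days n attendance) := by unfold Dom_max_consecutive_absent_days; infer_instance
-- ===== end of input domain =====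

-- B replaces A's running-streak pass by building the list of maximal zero-run lengths and taking its max (alternative decomposition, same cost).

-- ===== PORT A =====
def max_consecutive_absent_days (n : Int) (attendance : List Int) : Int :=
  -- for i in range(n): if attendance[i]==0: cur+=1 else: best=max(best,cur); cur=0
  let s := (PySem.List.pyRange 0 n 1).foldl
    (fun (st : Int × Int) i =>
      if PySem.List.pyGetD attendance i 0 = 0 then (st.1, st.2 + 1)
      else (max st.1 st.2, 0)) (0, 0)
  max s.1 s.2

-- ===== PORT B =====
-- (# of leading zeros, remainder) — B's inner `while prefix[j] == 0` scan
def pvSplitZeros : List Int → Nat × List Int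
  | [] => (0, [])
  | x :: xs => if x = 0 then ((pvSplitZeros xs).1 + 1, (pvSplitZeros xs).2) else (0, x :: xs)

theorem pvSplitZeros_length (l : List Int) : (pvSplitZeros l).2.length ≤ l.length := by
  induction l with
  | nil => simp [pvSplitZeros]
  | cons x xs ih =>
    simp only [pvSplitZeros]
    split_ifs <;> simp
    omega

-- B's outer while loop: the list `runs` of lengths of maximal zero-runs
def pvRuns : List Int → List Int
  | [] => []
  | x :: xs =>
    if x = 0 then ((pvSplitZeros xs).1 + 1 : Int) :: pvRuns (pvSplitZeros xs).2
    else pvRuns xs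
termination_by l => l.length
decreasing_by
  · exact Nat.lt_succ_of_le (pvSplitZeros_length xs)
  · simp

def max_consecutive_absent_days_alt (n : Int) (attendance : List Int) : Int :=
  let pre := (PySem.List.pyRange 0 n 1).map (fun i => PySem.List.pyGetD attendance i 0)
  (PySem.List.max? (pvRuns pre) (fun y => y)).getD 0   -- max(runs, default=0)

-- ===== PRECONDITION & SPEC =====
-- Pre_ excludes exactly n > len(attendance), where A raises IndexError (B raises there too).
def Pre_max_consecutive_absent_days (n : Int) (attendance : List Int) : Prop :=
  n ≤ (attendance.length : Int)
instance (n : Int) (attendance : List Int) : Decidable (Pre_max_consecutive_absent_days n attendance) := by unfold Pre_max_consecutive_absent_days; infer_instance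

def pvWitness_max_consecutive_absent_days : Int × List Int := (5, [0, 1, 0, 0, 1])

def Spec_max_consecutive_absent_days (n : Int) (attendance : List Int) (out : Int) : Prop := out = max_consecutive_absent_days_alt n attendance
instance (n : Int) (attendance : List Int) (out : Int) : Decidable (Spec_max_consecutive_absent_days n attendance out) := by unfold Spec_max_consecutive_absent_days; infer_instance

-- ===== CLAIM (what is proved, stated in full; the proofs are below) =====
def Claim_equal_max_consecutive_absent_days : Prop := ∀ (n : Int) (attendance : List Int), Dom_max_consecutive_absent_days n attendance → Pre_max_consecutive_absent_days n attendance → Spec_max_consecutive_absent_days n attendance (max_consecutive_absent_days n attendance)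

-- ===== LEMMAS AND PROOFS =====

-- pure specification: best streak reachable with current streak c over the rest of the list
def pvBest (c : Int) : List Int → Int
  | [] => c
  | x :: xs => if x = 0 then pvBest (c + 1) xs else max c (pvBest 0 xs)

theorem pvBest_ge (l : List Int) : ∀ c, c ≤ pvBest c l := by
  induction l with
  | nil => intro c; simp [pvBest]
  | cons x xs ih =>
    intro c
    simp only [pvBest]
    split_ifs
    · exact le_trans (by omega) (ih _)
    · exact le_max_left _ _

theorem foldl_step_eq (l : List Int) : ∀ m c,
    max (l.foldl (fun (st : Int × Int) x =>
        if x = 0 then (st.1, st.2 + 1) else (max st.1 st.2, 0)) (m, c)).1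
      (l.foldl (fun (st : Int × Int) x =>
        if x = 0 then (st.1, st.2 + 1) else (max st.1 st.2, 0)) (m, c)).2
    = max m (pvBest c l) := by
  induction l with
  | nil => intro m c; simp [pvBest]
  | cons x xs ih =>
    intro m c
    simp only [List.foldl_cons, pvBest]
    split_ifs
    · exact ih m (c + 1)
    · rw [ih (max m c) 0, max_assoc]

theorem pvSplitZeros_spec (l : List Int) : ∀ c,
    pvBest c l = pvBest (c + (pvSplitZeros l).1) (pvSplitZeros l).2 := by
  induction l with
  | nil => intro c; simp [pvSplitZeros]
  | cons x xs ih =>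
    intro c
    simp only [pvSplitZeros, pvBest]
    split_ifs with h
    · rw [ih (c + 1)]
      congr 1
      push_cast
      ring
    · simp [pvBest, h]

theorem pvSplitZeros_head (l : List Int) : ∀ y ys, (pvSplitZeros l).2 = y :: ys → y ≠ 0 := by
  induction l with
  | nil => intro y ys h; simp [pvSplitZeros] at h
  | cons x xs ih =>
    intro y ys h
    simp only [pvSplitZeros] at h
    split_ifs at h with hx
    · exact ih y ys h
    · rw [List.cons.injEq] at h
      rw [← h.1]; exact hx

theorem foldl_max_comm (l : List Int) : ∀ a b : Int,
    l.foldl max (max a b) = max a (l.foldl max b) := by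
  induction l with
  | nil => intro a b; simp
  | cons x xs ih =>
    intro a b
    simp only [List.foldl_cons, max_assoc]
    exact ih a (max b x)

theorem pvRuns_head_pos (l : List Int) : ∀ y ys, pvRuns l = y :: ys → 1 ≤ y := by
  induction l using pvRuns.induct with
  | case1 => intro y ys h; simp [pvRuns] at h
  | case2 xs ih =>
    intro y ys h
    simp [pvRuns] at h
    omega
  | case3 x xs hx ih =>
    intro y ys h
    simp only [pvRuns, if_neg hx] at h
    exact ih y ys h

theorem pvRuns_max_eq (l : List Int) :
    (pvRuns l).foldl max 0 = pvBest 0 l := by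
  induction l using pvRuns.induct with
  | case1 => simp [pvRuns, pvBest]
  | case2 xs ih =>
    have hk := pvSplitZeros_spec xs 1
    simp only [pvRuns, pvBest, if_true, List.foldl_cons]
    have h1 : max (0 : Int) (((pvSplitZeros xs).1 : Int) + 1) = ((pvSplitZeros xs).1 : Int) + 1 :=
      max_eq_right (by omega)
    rw [h1]
    have h2 : (pvRuns (pvSplitZeros xs).2).foldl max (((pvSplitZeros xs).1 : Int) + 1)
        = max (((pvSplitZeros xs).1 : Int) + 1) ((pvRuns (pvSplitZeros xs).2).foldl max 0) := by
      rw [← foldl_max_comm]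
      rw [max_eq_left (by omega)]
    rw [h2, ih]
    rw [show (0 : Int) + 1 = 1 by ring, hk]
    match hr2 : (pvSplitZeros xs).2 with
    | [] =>
      simp [pvBest]
      omega
    | y :: ys =>
      have hy := pvSplitZeros_head xs y ys hr2
      simp only [pvBest, if_neg hy]
      rw [max_eq_right (pvBest_ge ys 0)]
      congr 1
      ring
  | case3 x xs hx ih =>
    simp only [pvRuns, if_neg hx, pvBest]
    rw [ih]
    exact (max_eq_right (pvBest_ge xs 0)).symm

-- max(runs, default=0) over the run list equals the plain running max from 0
theorem max?_runs_getD (l : List Int) :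
    (PySem.List.max? (pvRuns l) (fun y => y)).getD 0 = (pvRuns l).foldl max 0 := by
  match h : pvRuns l with
  | [] => simp [PySem.List.max?]
  | r :: t =>
    rw [PySem.List.max?_id_cons]
    simp only [Option.getD_some, List.foldl_cons]
    rw [max_eq_right (le_trans zero_le_one (pvRuns_head_pos l r t h))]

-- A's indexed loop over range(n) equals the pure streak fold over the fetched prefix
theorem foldl_glue (att : List Int) (R : List Int) :
    List.foldl (fun (st : Int × Int) i =>
        if PySem.List.pyGetD att i 0 = 0 then (st.1, st.2 + 1) else (max st.1 st.2, 0)) (0, 0) R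
    = List.foldl (fun (st : Int × Int) x =>
        if x = 0 then (st.1, st.2 + 1) else (max st.1 st.2, 0)) (0, 0)
        (R.map (fun i => PySem.List.pyGetD att i 0)) := by
  rw [List.foldl_map]

-- ===== VERDICT (by name: the statement is the Claim_ definition above) =====
theorem max_consecutive_absent_days_spec : Claim_equal_max_consecutive_absent_days := by
  intro n attendance _ _
  unfold Spec_max_consecutive_absent_days max_consecutive_absent_days max_consecutive_absent_days_alt
  rw [foldl_glue, foldl_step_eq, max?_runs_getD, pvRuns_max_eq]
  exact max_eq_right (pvBest_ge _ 0)
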